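-- pv_equiv track=rewrite | github.com/pypi-data/pypi-mirror-403 | packages/iflow-mcp_viperjuice_code-index-mcp/iflow_mcp_viperjuice_code_index_mcp-1.0.0-py3-none-any.whl/mcp_server/plugins/rust_plugin/module_resolver.py | find_mod_declarations
-- ===== SOURCE A (Python) =====
-- from typing import Dict, List, Optional, Set, Tuple
--
-- def find_mod_declarations(file_content: str) -> List[Tuple[str, int]]:
--     """
--     Find all mod declarations in a file.
--
--     Returns:
--         List of (module_name, line_number) tuples
--     """
--     modules = []
--     lines = file_content.split("\n")
--
--     for i, line in enumerate(lines):
--         stripped = line.strip()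
--         # Match both "mod" and "pub mod"
--         if (
--             stripped.startswith("mod ") or stripped.startswith("pub mod ")
--         ) and "mod tests" not in stripped:
--             # Extract module name
--             parts = stripped.split()
--             # Find the position of "mod" keyword
--             mod_index = -1
--             for j, part in enumerate(parts):
--                 if part == "mod":
--                     mod_index = j
--                     break
--
--             if mod_index >= 0 and mod_index + 1 < len(parts):
--                 module_name = parts[mod_index + 1].rstrip(";{")
--                 modules.append((module_name, i + 1))
--
--     return modules
-- ===== SOURCE B (Python) =====
-- def _mod_name(stripped):
--     """Return the module name declared on this (stripped) line, or None."""
--     if "mod tests" in stripped: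
--         return None
--     if stripped.startswith("pub mod "):
--         rest = stripped[8:]
--     elif stripped.startswith("mod "):
--         rest = stripped[4:]
--     else:
--         return None
--     words = rest.split()
--     if not words:
--         return None
--     return words[0].rstrip(";{")
--
-- def find_mod_declarations(file_content):
--     return [
--         (name, i + 1)
--         for i, line in enumerate(file_content.split("\n"))
--         for name in (_mod_name(line.strip()),)
--         if name is not None
--     ]
-- ===== Notes on version B (the rewrite author's own statement) =====
-- stated objective: simpler
-- what changed: B drops A's whitespace-split of the whole line plus the linear scan for the first 'mod' token; it slices the module name directly after the matched 'mod '/'pub mod ' prefix and takes the first whitespace-separated word, expressed as a per-line helper feeding a comprehension.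
import Mathlib
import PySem

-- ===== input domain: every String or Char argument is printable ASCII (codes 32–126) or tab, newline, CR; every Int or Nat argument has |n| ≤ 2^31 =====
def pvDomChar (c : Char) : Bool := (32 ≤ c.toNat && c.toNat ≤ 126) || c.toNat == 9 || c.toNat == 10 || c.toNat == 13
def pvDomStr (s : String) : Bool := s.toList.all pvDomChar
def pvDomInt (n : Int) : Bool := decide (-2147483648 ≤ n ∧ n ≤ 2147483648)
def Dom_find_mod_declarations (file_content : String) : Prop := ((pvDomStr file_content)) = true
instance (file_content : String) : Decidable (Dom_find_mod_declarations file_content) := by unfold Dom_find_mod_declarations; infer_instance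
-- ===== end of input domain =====

-- B replaces A's whitespace-split plus linear scan for the "mod" token by direct prefix
-- slicing per line (simpler); return values are proved identical on all inputs.

-- ===== PORT A =====

-- exact port of str.rstrip(";{"): drop ';' and '{' characters from the right
def pyRstripSemiBrace (s : List Char) : List Char :=
  (s.reverse.dropWhile (fun c => c == ';' || c == '{')).reverse

-- A's inner loop: first index j with parts[j] == "mod", else -1
def findModIdx : List (List Char) → Int → Int
  | [], _ => -1
  | p :: ps, j => if p = "mod".toList then j else findModIdx ps (j + 1)

def find_mod_declarations (file_content : String) : List (String × Int) :=
  let lines := PySem.Chars.splitOn file_content.toList "\n".toList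
  (PySem.List.enumerate lines).foldl
    (fun modules il =>
      let stripped := PySem.Chars.strip il.2
      if (PySem.Chars.startswith stripped "mod ".toList
            || PySem.Chars.startswith stripped "pub mod ".toList)
          && !(PySem.Chars.isIn "mod tests".toList stripped) then
        let parts := PySem.Chars.split₀ stripped
        let modIdx := findModIdx parts 0
        if 0 ≤ modIdx ∧ modIdx + 1 < (parts.length : Int) then
          modules ++ [(String.ofList (pyRstripSemiBrace (PySem.List.pyGetD parts (modIdx + 1) [])), il.1 + 1)]
        else modules
      else modules) []

-- ===== PORT B =====

-- B's per-line helper _mod_name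
def modNameOfLine (stripped : List Char) : Option (List Char) :=
  if PySem.Chars.isIn "mod tests".toList stripped then none
  else
    let rest? : Option (List Char) :=
      if PySem.Chars.startswith stripped "pub mod ".toList then some (stripped.drop 8)
      else if PySem.Chars.startswith stripped "mod ".toList then some (stripped.drop 4)
      else none
    match rest? with
    | none => none
    | some rest =>
      match PySem.Chars.split₀ rest with
      | [] => none
      | w :: _ => some (pyRstripSemiBrace w)

def find_mod_declarations_alt (file_content : String) : List (String × Int) :=
  (PySem.List.enumerate (PySem.Chars.splitOn file_content.toList "\n".toList)).filterMap
    (fun il => (modNameOfLine (PySem.Chars.strip il.2)).map (fun n => (String.ofList n, il.1 + 1)))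

-- ===== PRECONDITION & SPEC =====
def Spec_find_mod_declarations (file_content : String) (out : List (String × Int)) : Prop := out = find_mod_declarations_alt file_content
instance (file_content : String) (out : List (String × Int)) : Decidable (Spec_find_mod_declarations file_content out) := by unfold Spec_find_mod_declarations; infer_instance

-- ===== CLAIM (what is proved, stated in full; the proofs are below) =====
def Claim_equal_find_mod_declarations : Prop := ∀ (file_content : String), Dom_find_mod_declarations file_content → Spec_find_mod_declarations file_content (find_mod_declarations file_content)

-- ===== LEMMAS AND PROOFS =====

-- A's loop body and B's per-line mapper, named for the proofs (defeq to the inline lambdas)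
def stepA (modules : List (String × Int)) (il : Int × List Char) : List (String × Int) :=
  let stripped := PySem.Chars.strip il.2
  if (PySem.Chars.startswith stripped "mod ".toList
        || PySem.Chars.startswith stripped "pub mod ".toList)
      && !(PySem.Chars.isIn "mod tests".toList stripped) then
    let parts := PySem.Chars.split₀ stripped
    let modIdx := findModIdx parts 0
    if 0 ≤ modIdx ∧ modIdx + 1 < (parts.length : Int) then
      modules ++ [(String.ofList (pyRstripSemiBrace (PySem.List.pyGetD parts (modIdx + 1) [])), il.1 + 1)]
    else modules
  else modules

def gB (il : Int × List Char) : Option (String × Int) :=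
  (modNameOfLine (PySem.Chars.strip il.2)).map (fun n => (String.ofList n, il.1 + 1))

theorem findModIdx_mod (ps : List (List Char)) (j : Int) : findModIdx ("mod".toList :: ps) j = j := by
  simp [findModIdx]

theorem findModIdx_pub (ps : List (List Char)) (j : Int) :
    findModIdx ("pub".toList :: ps) j = findModIdx ps (j + 1) := by
  simp [findModIdx]

theorem isspace_facts : PySem.Chars.isspace 'm' = false ∧ PySem.Chars.isspace 'o' = false ∧
    PySem.Chars.isspace 'd' = false ∧ PySem.Chars.isspace 'p' = false ∧
    PySem.Chars.isspace 'u' = false ∧ PySem.Chars.isspace 'b' = false ∧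
    PySem.Chars.isspace ' ' = true := by decide

theorem split₀_go_acc (s : List Char) : ∀ (cur : List Char) (acc : List (List Char)),
    PySem.Chars.split₀.go s cur acc = acc.reverse ++ PySem.Chars.split₀.go s cur [] := by
  induction s with
  | nil => intro cur acc; simp only [PySem.Chars.split₀.go]; split <;> simp
  | cons c rest ih =>
    intro cur acc
    simp only [PySem.Chars.split₀.go]
    by_cases h : PySem.Chars.isspace c
    · simp only [h, if_true]
      by_cases hc : cur.isEmpty <;> simp only [hc, ite_true, ite_false, Bool.false_eq_true]
      · exact ih [] acc
      · rw [ih [] (cur.reverse :: acc), ih [] [cur.reverse]]; simp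
    · simp only [h, Bool.false_eq_true, if_false]
      exact ih (c :: cur) acc

theorem split₀_mod (t : List Char) :
    PySem.Chars.split₀ ("mod ".toList ++ t) = "mod".toList :: PySem.Chars.split₀ t := by
  obtain ⟨h1,h2,h3,h4,h5,h6,h7⟩ := isspace_facts
  show PySem.Chars.split₀.go ('m'::'o'::'d'::' '::t) [] [] = _
  simp only [PySem.Chars.split₀.go, h1, h2, h3, h7, if_true, if_false, Bool.false_eq_true,
    List.isEmpty_cons, List.isEmpty_nil, ite_true, ite_false]
  rw [split₀_go_acc]
  rfl

theorem split₀_pubmod (t : List Char) :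
    PySem.Chars.split₀ ("pub mod ".toList ++ t) = "pub".toList :: "mod".toList :: PySem.Chars.split₀ t := by
  obtain ⟨h1,h2,h3,h4,h5,h6,h7⟩ := isspace_facts
  show PySem.Chars.split₀.go ('p'::'u'::'b'::' '::'m'::'o'::'d'::' '::t) [] [] = _
  simp only [PySem.Chars.split₀.go, h1, h2, h3, h4, h5, h6, h7, if_true, if_false, Bool.false_eq_true,
    List.isEmpty_cons, List.isEmpty_nil, ite_true, ite_false]
  rw [split₀_go_acc]
  rfl

-- the heart: A's loop body appends exactly the element B's mapper produces
theorem stepA_eq (modules : List (String × Int)) (i : Int) (line : List Char) :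
    stepA modules (i, line) = modules ++ (gB (i, line)).toList := by
  unfold stepA gB modNameOfLine
  by_cases hin : PySem.Chars.isIn "mod tests".toList (PySem.Chars.strip line)
  · simp only [String.toList] at hin ⊢
    simp [hin]
  · have hin' : PySem.Chars.isIn "mod tests".toList (PySem.Chars.strip line) = false := by
      revert hin; cases PySem.Chars.isIn "mod tests".toList (PySem.Chars.strip line) <;> simp
    by_cases hm : PySem.Chars.startswith (PySem.Chars.strip line) "mod ".toList
    · obtain ⟨t, ht⟩ := (PySem.Chars.startswith_iff _ _).mp hm
      rw [← ht] at hin' ⊢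
      have A1 : PySem.Chars.startswith ("mod ".toList ++ t) "mod ".toList = true := rfl
      have A2 : PySem.Chars.startswith ("mod ".toList ++ t) "pub mod ".toList = false := rfl
      have A3 : ("mod ".toList ++ t).drop 4 = t := rfl
      cases hsp : PySem.Chars.split₀ t with
      | nil =>
        simp only [A1, A2, A3, hin', split₀_mod, hsp, Bool.true_or, Bool.not_false,
          Bool.and_self, if_true, ite_true, Bool.false_eq_true, if_false, ite_false]
        rw [if_neg]
        · simp
        · simp [findModIdx]
      | cons w ws =>
        simp only [A1, A2, A3, hin', split₀_mod, hsp, Bool.true_or, Bool.not_false,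
          Bool.and_self, if_true, ite_true, Bool.false_eq_true, if_false, ite_false]
        rw [if_pos]
        · simp only [findModIdx, if_pos rfl]
          simp [PySem.List.pyGetD, PySem.List.pyGet?, PySem.List.pyIdx?]
        · refine ⟨by simp [findModIdx], ?_⟩
          simp only [findModIdx, if_pos rfl, List.length_cons]
          push_cast
          omega
    · by_cases hp : PySem.Chars.startswith (PySem.Chars.strip line) "pub mod ".toList
      · obtain ⟨t, ht⟩ := (PySem.Chars.startswith_iff _ _).mp hp
        rw [← ht] at hin' ⊢
        have A1 : PySem.Chars.startswith ("pub mod ".toList ++ t) "pub mod ".toList = true := rfl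
        have A2 : PySem.Chars.startswith ("pub mod ".toList ++ t) "mod ".toList = false := rfl
        have A3 : ("pub mod ".toList ++ t).drop 8 = t := rfl
        cases hsp : PySem.Chars.split₀ t with
        | nil =>
          simp only [A1, A2, A3, hin', split₀_pubmod, hsp, Bool.false_or, Bool.or_true,
            Bool.not_false, Bool.and_self, if_true, ite_true, Bool.false_eq_true, if_false, ite_false]
          rw [if_neg]
          · simp
          · decide
        | cons w ws =>
          simp only [A1, A2, A3, hin', split₀_pubmod, hsp, Bool.false_or, Bool.or_true,
            Bool.not_false, Bool.and_self, if_true, ite_true, Bool.false_eq_true, if_false, ite_false]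
          rw [if_pos]
          · simp only [findModIdx_pub, findModIdx_mod]
            simp [PySem.List.pyGetD, PySem.List.pyGet?, PySem.List.pyIdx?,
              show (2:Int) ≤ (ws.length:Int)+1+1 from by omega]
          · simp only [findModIdx_pub, findModIdx_mod, List.length_cons]
            refine ⟨by omega, ?_⟩
            push_cast
            omega
      · have hm' : PySem.Chars.startswith (PySem.Chars.strip line) "mod ".toList = false := by
          revert hm; cases PySem.Chars.startswith (PySem.Chars.strip line) "mod ".toList <;> simp
        have hp' : PySem.Chars.startswith (PySem.Chars.strip line) "pub mod ".toList = false := by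
          revert hp; cases PySem.Chars.startswith (PySem.Chars.strip line) "pub mod ".toList <;> simp
        simp only [hm', hp', Bool.or_self, Bool.false_and, Bool.false_eq_true, if_false, ite_false]
        simp

-- A's fold over the enumerated lines is B's filterMap
theorem foldl_stepA_eq_filterMap (l : List (Int × List Char)) :
    ∀ (acc : List (String × Int)), l.foldl stepA acc = acc ++ l.filterMap gB := by
  induction l with
  | nil => intro acc; simp
  | cons x xs ih =>
    intro acc
    rw [List.foldl_cons, ih, stepA_eq acc x.1 x.2]
    cases hg : gB x <;> simp [List.filterMap_cons, hg]

-- ===== VERDICT (by name: the statement is the Claim_ definition above) =====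
theorem find_mod_declarations_spec : Claim_equal_find_mod_declarations := by
  intro file_content _
  show find_mod_declarations file_content = find_mod_declarations_alt file_content
  show (PySem.List.enumerate (PySem.Chars.splitOn file_content.toList "\n".toList)).foldl stepA []
      = (PySem.List.enumerate (PySem.Chars.splitOn file_content.toList "\n".toList)).filterMap gB
  rw [foldl_stepA_eq_filterMap]
  rfl
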